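-- pv_equiv track=rewrite | github.com/mrbartrns/algorithm-and-structure | programmers/lv3/make0.py | solution
-- ===== SOURCE A (Python) =====
-- def dfs(i, graph, visited, answer, arr):
--     visited[i] = True
--     ans = arr[i]
--     for j in graph[i]:
--         if not visited[j]:
--             ans += dfs(j, graph, visited, answer, arr)
--     answer[0] += abs(ans)
--     return ans
--
-- def solution(a, edges):
--     if sum(a) != 0:
--         return -1
--     graph = [[] for _ in range(len(a))]
--     visited = [False] * len(a)
--     for i in range(len(edges)):
--         p, q = edges[i]
--         graph[p].append(q)
--         graph[q].append(p)
--     answer = [0]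
--     dfs(0, graph, visited, answer, a)
--
--     return answer[0]
-- ===== SOURCE B (Python) =====
-- def solution(a, edges):
--     if sum(a) != 0:
--         return -1
--     n = len(a)
--     graph = [[] for _ in range(n)]
--     for p, q in edges:
--         graph[p].append(q)
--         graph[q].append(p)
--     visited = [False] * n
--     psum = a[:]                      # per-node partial subtree sums
--     answer = 0
--     stack = [(0, -1, False)]         # (node, parent, processed?)
--     while stack:
--         node, parent, processed = stack.pop()
--         if processed:
--             t = psum[node]
--             answer += abs(t)
--             if parent != -1:
--                 psum[parent] += t
--         elif not visited[node]:
--             visited[node] = True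
--             stack.append((node, parent, True))
--             for j in reversed(graph[node]):
--                 stack.append((j, node, False))
--     return answer
-- ===== Notes on version B (the rewrite author's own statement) =====
-- stated objective: alternative
-- what changed: Replaces A's recursive DFS with mutable visited/answer cells by an iterative explicit-stack post-order traversal that keeps a per-node partial-subtree-sum array and accumulates abs() when a node's exit entry is popped.
-- outside the precondition, e.g. on solution([-1, -1, 2], [[-3, -1], [-2, -1]]): A returns 2, B returns 4
import Mathlib
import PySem

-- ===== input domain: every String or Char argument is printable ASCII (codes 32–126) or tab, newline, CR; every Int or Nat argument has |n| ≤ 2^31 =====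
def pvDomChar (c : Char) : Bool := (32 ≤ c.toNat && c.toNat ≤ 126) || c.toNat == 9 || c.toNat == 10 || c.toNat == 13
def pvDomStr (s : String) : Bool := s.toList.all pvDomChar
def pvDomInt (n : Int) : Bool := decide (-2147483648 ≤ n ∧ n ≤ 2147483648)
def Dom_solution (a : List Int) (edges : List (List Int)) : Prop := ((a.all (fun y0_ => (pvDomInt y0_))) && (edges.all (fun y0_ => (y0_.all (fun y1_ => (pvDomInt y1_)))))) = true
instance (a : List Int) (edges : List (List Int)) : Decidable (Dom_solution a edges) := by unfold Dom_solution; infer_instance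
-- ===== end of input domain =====

-- ===== PORT A =====
-- B replaces A's recursive DFS by an iterative explicit-stack post-order traversal
-- with a per-node partial-subtree-sum array; return values proved equal on Pre_.

-- graph build shared by both Pythons (both build the adjacency list with the same loop)
def pvBuildGraph (n : Nat) (edges : List (List Int)) : List (List Int) :=
  edges.foldl (fun g e =>
    (g.modify (e.getD 0 0).toNat (fun l => l ++ [e.getD 1 0])).modify
      (e.getD 1 0).toNat (fun l => l ++ [e.getD 0 0]))
    (List.replicate n [])

-- A's recursive dfs; fuel only makes the recursion well-founded (never exhausted on Pre_).
mutual
def dfsA (fuel : Nat) (i : Nat) (graph : List (List Int)) (arr : List Int)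
    (visited : List Bool) (answer : Int) : List Bool × Int × Int :=
  match fuel with
  | 0 => (visited, answer, 0)
  | f + 1 =>
    let v := visited.set i true
    let r := dfsGo f (graph.getD i []) graph arr v answer (arr.getD i 0)
    (r.1, r.2.1 + |r.2.2|, r.2.2)
termination_by (fuel, 0)
decreasing_by apply Prod.Lex.left; omega

def dfsGo (fuel : Nat) (js : List Int) (graph : List (List Int)) (arr : List Int)
    (visited : List Bool) (answer : Int) (acc : Int) : List Bool × Int × Int :=
  match js with
  | [] => (visited, answer, acc)
  | j :: rest =>
    if visited.getD j.toNat false then dfsGo fuel rest graph arr visited answer acc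
    else
      let r := dfsA fuel j.toNat graph arr visited answer
      dfsGo fuel rest graph arr r.1 r.2.1 (acc + r.2.2)
termination_by (fuel, js.length + 1)
decreasing_by
  · apply Prod.Lex.right; simp
  · apply Prod.Lex.right; omega
  · apply Prod.Lex.right; simp
end

def solution (a : List Int) (edges : List (List Int)) : Int :=
  if a.sum ≠ 0 then -1
  else
    (dfsA a.length 0 (pvBuildGraph a.length edges) a
      (List.replicate a.length false) 0).2.1

-- ===== PORT B =====
def pvWeight (st : List (Int × Int × Bool)) : Nat :=
  (st.map (fun e => if e.2.2 then 1 else 2)).sum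

-- used by machine's termination measure
theorem pvCountFalseSetEq (v : List Bool) (i : Nat) (h : i < v.length)
    (hf : v.getD i false = false) :
    (v.set i true).count false + 1 = v.count false := by
  induction v generalizing i with
  | nil => simp at h
  | cons b t ih =>
    cases i with
    | zero =>
      simp only [List.getD] at hf
      simp at hf
      subst hf
      simp
    | succ m =>
      simp only [List.length_cons, Nat.add_lt_add_iff_right] at h
      have := ih m h (by simpa [List.getD] using hf)
      simp only [show (b :: t).set (m + 1) true = b :: t.set m true from rfl,
        List.count_cons]
      omega

-- B's while-loop over the explicit stack of (node, parent, processed?) entries.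
def machine (graph : List (List Int)) (stack : List (Int × Int × Bool))
    (visited : List Bool) (psum : List Int) (answer : Int) : Int :=
  match stack with
  | [] => answer
  | (node, parent, proc) :: rest =>
    if _hp : proc then
      let t := psum.getD node.toNat 0
      machine graph rest visited
        (if parent != -1 then psum.modify parent.toNat (· + t) else psum) (answer + |t|)
    else if hv : visited.getD node.toNat false then
      machine graph rest visited psum answer
    else if h : node.toNat < visited.length then
      machine graph
        ((graph.getD node.toNat []).reverse.foldl (fun st j => (j, node, false) :: st)
          ((node, parent, true) :: rest))
        (visited.set node.toNat true) psum answer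
    else -- totality guard only: out-of-range index (Python raises here, outside Pre_)
      machine graph rest visited psum answer
termination_by (visited.count false, pvWeight stack)
decreasing_by
  · apply Prod.Lex.right; simp [pvWeight]; split <;> omega
  · apply Prod.Lex.right; simp [pvWeight]; split <;> omega
  · apply Prod.Lex.left
    have := pvCountFalseSetEq visited node.toNat h (by simpa using hv)
    omega
  · apply Prod.Lex.right; simp [pvWeight]; split <;> omega

def solution_alt (a : List Int) (edges : List (List Int)) : Int :=
  if a.sum ≠ 0 then -1
  else
    machine (pvBuildGraph a.length edges) [(0, -1, false)]
      (List.replicate a.length false) a 0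

-- ===== PRECONDITION & SPEC =====
-- Pre_ excludes exactly the inputs where A raises (empty a with zero sum, an edge row not of
-- length 2, an endpoint ≥ len(a)) and edge endpoints that are negative, where Python's
-- negative-index wraparound makes A's traversal an accident of list indexing (node ids are
-- 0..n-1 in the problem); when sum(a) ≠ 0 A returns -1 before touching edges, so those inputs
-- are all admitted.
def Pre_solution (a : List Int) (edges : List (List Int)) : Prop :=
  a.sum ≠ 0 ∨
    (a ≠ [] ∧ ∀ e ∈ edges, e.length = 2 ∧ ∀ x ∈ e, 0 ≤ x ∧ x < (a.length : Int))
instance (a : List Int) (edges : List (List Int)) : Decidable (Pre_solution a edges) := by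
  unfold Pre_solution; infer_instance
def pvWitness_solution : List Int × List (List Int) := ([1, -1], [[0, 1]])

def Spec_solution (a : List Int) (edges : List (List Int)) (out : Int) : Prop := out = solution_alt a edges
instance (a : List Int) (edges : List (List Int)) (out : Int) : Decidable (Spec_solution a edges out) := by unfold Spec_solution; infer_instance

-- ===== CLAIM (what is proved, stated in full; the proofs are below) =====
def Claim_equal_solution : Prop := ∀ (a : List Int) (edges : List (List Int)), Dom_solution a edges → Pre_solution a edges → Spec_solution a edges (solution a edges)

-- ===== LEMMAS AND PROOFS =====

-- generic list-access glue
theorem pvGetDSet {α : Type} (v : List α) (i k : Nat) (x d : α) :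
    (v.set i x).getD k d = if i = k ∧ i < v.length then x else v.getD k d := by
  simp only [List.getD_eq_getElem?_getD, List.getElem?_set]
  by_cases h1 : i = k
  · subst h1
    by_cases h2 : i < v.length <;> simp [h2]
  · simp [h1]

theorem pvGetDModifySelf {α : Type} (v : List α) (i : Nat) (f : α → α) (d : α)
    (h : i < v.length) : (v.modify i f).getD i d = f (v.getD i d) := by
  simp only [List.getD_eq_getElem?_getD, List.getElem?_modify, List.getElem?_eq_getElem h]
  simp

theorem pvGetDModifyNe {α : Type} (v : List α) (i k : Nat) (f : α → α) (d : α)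
    (h : i ≠ k) : (v.modify i f).getD k d = v.getD k d := by
  simp only [List.getD_eq_getElem?_getD, List.getElem?_modify]
  cases hk : v[k]? <;> simp [h]

-- value stored in a well-formed graph
def pvGood (n : Nat) (graph : List (List Int)) : Prop :=
  graph.length = n ∧ ∀ l ∈ graph, ∀ j ∈ l, 0 ≤ j ∧ j.toNat < n

theorem pvMemModify {α : Type} (g : List α) (i : Nat) (f : α → α) (P : α → Prop)
    (hg : ∀ l ∈ g, P l) (hf : ∀ l, P l → P (f l)) : ∀ l ∈ g.modify i f, P l := by
  intro l hl
  rw [List.mem_iff_getElem] at hl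
  obtain ⟨j, hj, rfl⟩ := hl
  rw [List.getElem_modify]
  split
  · exact hf _ (hg _ (List.getElem_mem _))
  · exact hg _ (List.getElem_mem _)

theorem pvBuildStepGood (n : Nat) (e : List Int)
    (hee : e.length = 2 ∧ ∀ x ∈ e, 0 ≤ x ∧ x < (n : Int)) (g : List (List Int))
    (hg : pvGood n g) :
    pvGood n ((g.modify (e.getD 0 0).toNat (fun l => l ++ [e.getD 1 0])).modify
      (e.getD 1 0).toNat (fun l => l ++ [e.getD 0 0])) := by
  obtain ⟨hlen, hmem⟩ := hg
  have h0 : e.getD 0 0 ∈ e := by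
    rw [List.getD_eq_getElem e 0 (by omega)]
    exact List.getElem_mem _
  have h1 : e.getD 1 0 ∈ e := by
    rw [List.getD_eq_getElem e 0 (n := 1) (by omega)]
    exact List.getElem_mem _
  have p0 := hee.2 _ h0
  have p1 := hee.2 _ h1
  refine ⟨by simp [List.length_modify, hlen], ?_⟩
  apply pvMemModify
  · apply pvMemModify _ _ _ _ hmem
    intro l hl j hj
    rcases List.mem_append.1 hj with h | h
    · exact hl j h
    · simp only [List.mem_singleton] at h; subst h; exact ⟨p1.1, by omega⟩
  · intro l hl j hj
    rcases List.mem_append.1 hj with h | h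
    · exact hl j h
    · simp only [List.mem_singleton] at h; subst h; exact ⟨p0.1, by omega⟩

theorem pvBuildFold (n : Nat) (l : List (List Int)) (g : List (List Int))
    (hl : ∀ e ∈ l, e.length = 2 ∧ ∀ x ∈ e, 0 ≤ x ∧ x < (n : Int)) (hg : pvGood n g) :
    pvGood n (l.foldl (fun g e =>
      (g.modify (e.getD 0 0).toNat (fun l => l ++ [e.getD 1 0])).modify
        (e.getD 1 0).toNat (fun l => l ++ [e.getD 0 0])) g) := by
  induction l generalizing g with
  | nil => exact hg
  | cons e t ih =>
    exact ih _ (fun e' h => hl e' (List.mem_cons_of_mem _ h))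
      (pvBuildStepGood n e (hl e List.mem_cons_self) g hg)

theorem pvBuildGraphGood (n : Nat) (edges : List (List Int))
    (he : ∀ e ∈ edges, e.length = 2 ∧ ∀ x ∈ e, 0 ≤ x ∧ x < (n : Int)) :
    pvGood n (pvBuildGraph n edges) := by
  unfold pvBuildGraph
  apply pvBuildFold n edges _ he
  constructor
  · simp
  · intro l hl j hj
    rw [List.eq_of_mem_replicate hl] at hj
    simp at hj

-- pushing the reversed adjacency equals prepending the mapped adjacency
theorem pvPushAll (l : List Int) (node : Int) (st0 : List (Int × Int × Bool)) :
    l.reverse.foldl (fun st j => (j, node, false) :: st) st0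
      = l.map (fun j => (j, node, false)) ++ st0 := by
  rw [List.foldl_reverse]
  induction l with
  | nil => rfl
  | cons x t ih => simp [ih]

-- unfolding lemmas for machine
theorem machine_nil (g : List (List Int)) (v : List Bool) (p : List Int) (ans : Int) :
    machine g [] v p ans = ans := by
  rw [machine]

theorem machine_exit (g : List (List Int)) (node parent : Int)
    (rest : List (Int × Int × Bool)) (v : List Bool) (p : List Int) (ans : Int) :
    machine g ((node, parent, true) :: rest) v p ans
      = machine g rest v
          (if parent != -1 then p.modify parent.toNat (· + p.getD node.toNat 0) else p)
          (ans + |p.getD node.toNat 0|) := by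
  rw [machine]; simp

theorem machine_skip (g : List (List Int)) (node parent : Int)
    (rest : List (Int × Int × Bool)) (v : List Bool) (p : List Int) (ans : Int)
    (hv : v.getD node.toNat false = true) :
    machine g ((node, parent, false) :: rest) v p ans = machine g rest v p ans := by
  rw [machine]
  rw [dif_neg (by simp), dif_pos hv]

theorem machine_enter (g : List (List Int)) (node parent : Int)
    (rest : List (Int × Int × Bool)) (v : List Bool) (p : List Int) (ans : Int)
    (hv : v.getD node.toNat false = false) (h : node.toNat < v.length) :
    machine g ((node, parent, false) :: rest) v p ans
      = machine g
          ((g.getD node.toNat []).map (fun j => (j, node, false)) ++ (node, parent, true) :: rest)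
          (v.set node.toNat true) p ans := by
  rw [machine]
  rw [dif_neg (by simp), dif_neg (by rw [hv]; simp), dif_pos h, pvPushAll]

-- the two simulation statements

def pvSim (fuel : Nat) : Prop :=
  ∀ (n : Nat) (graph : List (List Int)) (arr : List Int), pvGood n graph → arr.length = n →
  ∀ (visited : List Bool), visited.length = n →
  ∀ (psum : List Int), psum.length = n →
  ∀ (i : Nat), i < n → visited.getD i false = false →
  (∀ k, k < n → visited.getD k false = false → psum.getD k 0 = arr.getD k 0) →
  visited.count false ≤ fuel →
  ∀ (parent : Int), (parent = -1 ∨ (0 ≤ parent ∧ parent.toNat < n ∧ visited.getD parent.toNat false = true)) →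
  ∀ (answer : Int) (rest : List (Int × Int × Bool)),
  ∃ psum' : List Int,
    machine graph (((i : Int), parent, false) :: rest) visited psum answer
      = machine graph rest (dfsA fuel i graph arr visited answer).1 psum'
          (dfsA fuel i graph arr visited answer).2.1
    ∧ psum'.length = n
    ∧ (∀ k, k < n → (dfsA fuel i graph arr visited answer).1.getD k false = false →
        psum'.getD k 0 = arr.getD k 0)
    ∧ (∀ k, k < n → visited.getD k false = true →
        psum'.getD k 0 = (if parent ≠ -1 ∧ parent.toNat = k
          then psum.getD k 0 + (dfsA fuel i graph arr visited answer).2.2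
          else psum.getD k 0))
    ∧ (dfsA fuel i graph arr visited answer).1.length = n
    ∧ (∀ k, visited.getD k false = true → (dfsA fuel i graph arr visited answer).1.getD k false = true)
    ∧ (dfsA fuel i graph arr visited answer).1.getD i false = true
    ∧ (dfsA fuel i graph arr visited answer).1.count false < visited.count false

def pvGoSim (fuel : Nat) : Prop :=
  ∀ (n : Nat) (graph : List (List Int)) (arr : List Int), pvGood n graph → arr.length = n →
  ∀ (js : List Int), (∀ j ∈ js, 0 ≤ j ∧ j.toNat < n) →
  ∀ (visited : List Bool), visited.length = n →
  ∀ (psum : List Int), psum.length = n →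
  ∀ (i : Nat), i < n → visited.getD i false = true →
  (∀ k, k < n → visited.getD k false = false → psum.getD k 0 = arr.getD k 0) →
  visited.count false ≤ fuel →
  ∀ (acc : Int), psum.getD i 0 = acc →
  ∀ (answer : Int) (parent : Int) (rest : List (Int × Int × Bool)),
  ∃ psum' : List Int,
    machine graph (js.map (fun j => (j, (i : Int), false)) ++ (((i : Int), parent, true) :: rest))
        visited psum answer
      = machine graph (((i : Int), parent, true) :: rest)
          (dfsGo fuel js graph arr visited answer acc).1 psum'
          (dfsGo fuel js graph arr visited answer acc).2.1
    ∧ psum'.length = n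
    ∧ (∀ k, k < n → (dfsGo fuel js graph arr visited answer acc).1.getD k false = false →
        psum'.getD k 0 = arr.getD k 0)
    ∧ (∀ k, k < n → visited.getD k false = true →
        psum'.getD k 0 = (if k = i then (dfsGo fuel js graph arr visited answer acc).2.2
          else psum.getD k 0))
    ∧ (dfsGo fuel js graph arr visited answer acc).1.length = n
    ∧ (∀ k, visited.getD k false = true →
        (dfsGo fuel js graph arr visited answer acc).1.getD k false = true)
    ∧ (dfsGo fuel js graph arr visited answer acc).1.count false ≤ visited.count false

-- equation lemmas for the dfs pair
theorem dfsA_succ (f i : Nat) (graph : List (List Int)) (arr : List Int)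
    (visited : List Bool) (answer : Int) :
    dfsA (f + 1) i graph arr visited answer
      = ((dfsGo f (graph.getD i []) graph arr (visited.set i true) answer (arr.getD i 0)).1,
         (dfsGo f (graph.getD i []) graph arr (visited.set i true) answer (arr.getD i 0)).2.1
           + |(dfsGo f (graph.getD i []) graph arr (visited.set i true) answer (arr.getD i 0)).2.2|,
         (dfsGo f (graph.getD i []) graph arr (visited.set i true) answer (arr.getD i 0)).2.2) := by
  rw [dfsA]

theorem dfsGo_nil (fuel : Nat) (graph : List (List Int)) (arr : List Int)
    (visited : List Bool) (answer acc : Int) :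
    dfsGo fuel [] graph arr visited answer acc = (visited, answer, acc) := by
  rw [dfsGo]

theorem dfsGo_skip (fuel : Nat) (j : Int) (t : List Int) (graph : List (List Int))
    (arr : List Int) (visited : List Bool) (answer acc : Int)
    (hjv : visited.getD j.toNat false = true) :
    dfsGo fuel (j :: t) graph arr visited answer acc
      = dfsGo fuel t graph arr visited answer acc := by
  rw [dfsGo, if_pos hjv]

theorem dfsGo_cons (fuel : Nat) (j : Int) (t : List Int) (graph : List (List Int))
    (arr : List Int) (visited : List Bool) (answer acc : Int)
    (hjv : visited.getD j.toNat false = false) :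
    dfsGo fuel (j :: t) graph arr visited answer acc
      = dfsGo fuel t graph arr (dfsA fuel j.toNat graph arr visited answer).1
          (dfsA fuel j.toNat graph arr visited answer).2.1
          (acc + (dfsA fuel j.toNat graph arr visited answer).2.2) := by
  rw [dfsGo, if_neg (by rw [hjv]; simp)]

theorem pvCountPos (v : List Bool) (i : Nat) (h : i < v.length)
    (hf : v.getD i false = false) : 0 < v.count false := by
  rw [List.getD_eq_getElem _ _ h] at hf
  exact List.count_pos_iff.2 (hf ▸ List.getElem_mem h)

theorem pvSetMono (v : List Bool) (i k : Nat) (h : v.getD k false = true) :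
    (v.set i true).getD k false = true := by
  rw [pvGetDSet]
  split
  · rfl
  · exact h

theorem pvSim0 : pvSim 0 := by
  intro n graph arr hg ha visited hv psum hp i hi hiv H4 hfuel parent hpar answer rest
  exact absurd (pvCountPos visited i (hv ▸ hi) hiv) (by omega)

theorem pvGoSimOf (fuel : Nat) (hsim : pvSim fuel) : pvGoSim fuel := by
  intro n graph arr hg ha js hjs
  induction js with
  | nil =>
    intro visited hv psum hp i hi hvi H4 hfuel acc hacc answer parent rest
    simp only [dfsGo_nil, List.map_nil, List.nil_append]
    refine ⟨psum, rfl, hp, H4, ?_, hv, fun k hk => hk, le_refl _⟩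
    intro k hk hkv
    split
    · next hki => subst hki; exact hacc
    · rfl
  | cons j t ih =>
    intro visited hv psum hp i hi hvi H4 hfuel acc hacc answer parent rest
    have hj := hjs j List.mem_cons_self
    have hjs' : ∀ x ∈ t, 0 ≤ x ∧ x.toNat < n := fun x hx => hjs x (List.mem_cons_of_mem _ hx)
    by_cases hjv : visited.getD j.toNat false = true
    · -- child already visited: skipped on both sides
      obtain ⟨psum', e1, e2, e3, e4, e5, e6, e7⟩ :=
        ih hjs' visited hv psum hp i hi hvi H4 hfuel acc hacc answer parent rest
      refine ⟨psum', ?_, e2, ?_, ?_, ?_, ?_, ?_⟩ <;>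
        rw [dfsGo_skip _ _ _ _ _ _ _ _ hjv]
      · rw [List.map_cons, List.cons_append,
          machine_skip _ _ _ _ _ _ _ hjv]
        exact e1
      · exact e3
      · exact e4
      · exact e5
      · exact e6
      · exact e7
    · -- child unvisited: one simulated recursive call, then the rest of the loop
      rw [Bool.not_eq_true] at hjv
      have hconv : ((j.toNat : Nat) : Int) = j := Int.toNat_of_nonneg hj.1
      have hpar' : ((i : Nat) : Int) = -1 ∨
          (0 ≤ ((i : Nat) : Int) ∧ (((i : Nat) : Int)).toNat < n ∧
            visited.getD (((i : Nat) : Int)).toNat false = true) := by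
        right
        refine ⟨by omega, ?_, ?_⟩
        · simpa using hi
        · rw [Int.toNat_natCast]; exact hvi
      obtain ⟨psum2, s1, s2, s3, s4, s5, s6, s7, s8⟩ :=
        hsim n graph arr hg ha visited hv psum hp j.toNat hj.2 hjv H4 hfuel
          ((i : Nat) : Int) hpar' answer
          (t.map (fun x => (x, ((i : Nat) : Int), false)) ++ (((i : Nat) : Int), parent, true) :: rest)
      -- state after the child call
      set A := dfsA fuel j.toNat graph arr visited answer with hA
      have hi_ne : ((i : Nat) : Int) ≠ -1 := by omega
      have hacc2 : psum2.getD i 0 = acc + A.2.2 := by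
        have := s4 i hi hvi
        rw [if_pos ⟨hi_ne, by simp⟩] at this
        rw [this, hacc]
      obtain ⟨psum', e1, e2, e3, e4, e5, e6, e7⟩ :=
        ih hjs' A.1 s5 psum2 s2 i hi (s6 i hvi) s3 (by omega) (acc + A.2.2) hacc2
          A.2.1 parent rest
      refine ⟨psum', ?_, e2, ?_, ?_, ?_, ?_, ?_⟩ <;>
        rw [dfsGo_cons _ _ _ _ _ _ _ _ hjv]
      · rw [List.map_cons, List.cons_append]
        calc machine graph ((j, ((i : Nat) : Int), false) ::
                (t.map (fun x => (x, ((i : Nat) : Int), false)) ++ (((i : Nat) : Int), parent, true) :: rest))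
              visited psum answer
            = machine graph
                (t.map (fun x => (x, ((i : Nat) : Int), false)) ++ (((i : Nat) : Int), parent, true) :: rest)
                A.1 psum2 A.2.1 := by rw [← hconv]; exact s1
          _ = _ := e1
      · exact e3
      · -- old-visited slots: only i has changed, to the loop's accumulated sum
        intro k hk hkv
        have h2 := e4 k hk (s6 k hkv)
        rw [h2]
        split
        · rfl
        · next hki =>
          have := s4 k hk hkv
          rw [if_neg (by simp [Int.toNat_natCast]; omega)] at this
          exact this
      · exact e5
      · intro k hk; exact e6 k (s6 k hk)
      · rw [← hA]; omega

theorem pvSimSucc (f : Nat) (hgo : pvGoSim f) : pvSim (f + 1) := by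
  intro n graph arr hg ha visited hv psum hp i hi hiv H4 hfuel parent hpar answer rest
  have hadj : ∀ j ∈ graph.getD i [], 0 ≤ j ∧ j.toNat < n := by
    intro j hj
    rw [List.getD_eq_getElem _ _ (by rw [hg.1]; exact hi : i < graph.length)] at hj
    exact hg.2 _ (List.getElem_mem _) j hj
  have hvc := pvCountFalseSetEq visited i (hv ▸ hi) hiv
  have hviset : (visited.set i true).getD i false = true := by
    rw [pvGetDSet]; simp [hv ▸ hi]
  have H4' : ∀ k, k < n → (visited.set i true).getD k false = false →
      psum.getD k 0 = arr.getD k 0 := by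
    intro k hk hkv
    by_cases hki : i = k
    · subst hki; rw [hviset] at hkv; exact absurd hkv (by simp)
    · rw [pvGetDSet, if_neg (by tauto)] at hkv
      exact H4 k hk hkv
  obtain ⟨psum2, s1, s2, s3, s4, s5, s6, s7⟩ :=
    hgo n graph arr hg ha (graph.getD i []) hadj (visited.set i true)
      (by simp [hv]) psum hp i hi hviset H4' (by omega)
      (arr.getD i 0) (H4 i hi hiv) answer parent rest
  set G := dfsGo f (graph.getD i []) graph arr (visited.set i true) answer (arr.getD i 0) with hG
  have hti : (((i : Nat) : Int)).toNat = i := by simp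
  have hpsum2i : psum2.getD i 0 = G.2.2 := by
    have := s4 i hi hviset
    rwa [if_pos rfl] at this
  refine ⟨if (parent != -1) = true then psum2.modify parent.toNat (· + G.2.2) else psum2,
    ?_, ?_, ?_, ?_, ?_, ?_, ?_, ?_⟩ <;> (try rw [dfsA_succ, ← hG])
  · -- the machine run: enter i, run the children loop, pop i's exit entry
    rw [machine_enter _ _ _ _ _ _ _ (by rwa [hti]) (by rw [hti, hv]; exact hi), hti, s1,
      machine_exit, hti, hpsum2i]
  · split <;> simp [List.length_modify, s2]
  · intro k hk hkv
    have h2 := s3 k hk hkv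
    split
    · next hbne =>
      have hpar2 : 0 ≤ parent ∧ parent.toNat < n ∧ visited.getD parent.toNat false = true := by
        rcases hpar with h | h
        · subst h; simp at hbne
        · exact h
      rw [pvGetDModifyNe]
      · exact h2
      · intro hpk
        have : G.1.getD parent.toNat false = true :=
          s6 parent.toNat (pvSetMono _ _ _ hpar2.2.2)
        rw [hpk] at this
        rw [this] at hkv
        exact absurd hkv (by simp)
    · exact h2
  · -- previously-visited slots: only the parent slot gains the subtree sum
    intro k hk hkv
    have hki : i ≠ k := by
      intro h; rw [← h] at hkv; rw [hiv] at hkv; exact absurd hkv (by simp)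
    have h2 : psum2.getD k 0 = psum.getD k 0 := by
      have := s4 k hk (pvSetMono _ _ _ hkv)
      rwa [if_neg (by tauto)] at this
    by_cases hpn : parent = -1
    · subst hpn
      rw [if_neg (by simp), if_neg (by simp)]
      exact h2
    · rw [if_pos (by simpa using hpn)]
      by_cases hpk : parent.toNat = k
      · rw [if_pos ⟨hpn, hpk⟩, ← hpk]
        rw [pvGetDModifySelf _ _ _ _ (by rw [s2]; rw [hpk]; exact hk)]
        rw [hpk, h2]
      · rw [if_neg (by tauto), pvGetDModifyNe _ _ _ _ _ hpk]
        exact h2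
  · exact s5
  · intro k hk; exact s6 k (pvSetMono _ _ _ hk)
  · exact s6 i hviset
  · dsimp only; omega

theorem pvSimAll : ∀ fuel, pvSim fuel ∧ pvGoSim fuel := by
  intro fuel
  induction fuel with
  | zero => exact ⟨pvSim0, pvGoSimOf 0 pvSim0⟩
  | succ f ih =>
    have hs := pvSimSucc f (ih.2)
    exact ⟨hs, pvGoSimOf _ hs⟩

-- ===== VERDICT (by name: the statement is the Claim_ definition above) =====
theorem solution_spec : Claim_equal_solution := by
  unfold Claim_equal_solution
  intro a edges _hdom hpre
  unfold Spec_solution solution solution_alt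
  by_cases hs : a.sum ≠ 0
  · rw [if_pos hs, if_pos hs]
  · rw [if_neg hs, if_neg hs]
    rcases hpre with h | ⟨hne, he⟩
    · exact absurd h hs
    have hn : 0 < a.length := List.length_pos_iff.2 hne
    obtain ⟨psum', m1, -⟩ :=
      (pvSimAll a.length).1 a.length (pvBuildGraph a.length edges) a
        (pvBuildGraphGood a.length edges he) rfl
        (List.replicate a.length false) (by simp) a rfl 0 hn
        (List.getD_replicate _ hn)
        (fun k _ _ => rfl) (by simp)
        (-1) (Or.inl rfl) 0 []
    rw [machine_nil] at m1
    simpa using m1.symm
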